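-- pv_equiv track=rewrite | github.com/ICHIZXC/Object-Oriented-Data-Structure | Recursion/Recursion 5.py | find_total_weight_of_one
-- ===== SOURCE A (Python) =====
-- def fib(n):
--     if n <= 0:
--         return 0
--     elif n == 1:
--         return 1
--     else:
--         return fib(n - 1) + fib(n - 2)
--
-- def find_total_weight_of_one(purify, weight):
--     if purify == 1: return weight
--
--     ck = fib(purify - 1)
--
--     total_ab = 2 * weight + 1 - ck
--
--     if total_ab < 2: return -1
--
--     if total_ab % 2 == 0:
--         a = b = total_ab // 2
--     else:
--         a = total_ab // 2
--         b = total_ab - a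
--
--     wa = find_total_weight_of_one(purify - 1, a)
--     wb = find_total_weight_of_one(purify - 1, b)
--
--     return wa + wb
-- ===== SOURCE B (Python) =====
-- def fib(n):
--     a, b = 0, 1
--     for _ in range(n):
--         a, b = b, a + b
--     return a
--
-- def find_total_weight_of_one(purify, weight):
--     # level-by-level DP: keep a counter {weight: multiplicity} for the current
--     # level instead of exploring the exponential recursion tree, and use the
--     # iterative fib above instead of the naive doubly-recursive one.
--     if purify == 1:
--         return weight
--     total = 0
--     counts = {weight: 1}
--     p = purify
--     while p > 1:
--         ck = fib(p - 1)
--         nxt = {}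
--         for w, c in counts.items():
--             t = 2 * w + 1 - ck
--             if t < 2:
--                 total -= c
--             else:
--                 a = t // 2
--                 b = t - a
--                 nxt[a] = nxt.get(a, 0) + c
--                 nxt[b] = nxt.get(b, 0) + c
--         counts = nxt
--         p -= 1
--     for w, c in counts.items():
--         total += w * c
--     return total
-- ===== Notes on version B (the rewrite author's own statement) =====
-- stated objective: faster
-- what changed: Replaces the exponential recursion tree (and the naive doubly-recursive fib) by a level-by-level dynamic program that keeps a counter {weight: multiplicity} per level and an iterative fib, so each of the purify levels is processed once.
-- outside the precondition, e.g. on find_total_weight_of_one(0, 0): A returns -1, B returns 0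
import Mathlib
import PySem

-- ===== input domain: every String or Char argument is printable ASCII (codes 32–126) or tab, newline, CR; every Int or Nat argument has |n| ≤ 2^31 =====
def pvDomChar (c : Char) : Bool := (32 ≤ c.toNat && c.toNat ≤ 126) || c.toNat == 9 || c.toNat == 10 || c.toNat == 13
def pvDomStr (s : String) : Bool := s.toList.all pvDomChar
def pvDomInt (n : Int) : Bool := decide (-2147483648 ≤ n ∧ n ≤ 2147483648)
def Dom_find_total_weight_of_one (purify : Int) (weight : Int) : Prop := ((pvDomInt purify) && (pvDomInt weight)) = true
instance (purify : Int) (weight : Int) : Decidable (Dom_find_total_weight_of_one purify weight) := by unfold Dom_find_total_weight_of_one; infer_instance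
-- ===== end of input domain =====

-- B replaces the exponential tree recursion (with naive doubly-recursive fib) by a level-by-level
-- counter of weights and an iterative fib; objective: faster.

-- ===== PORT A =====
def fibA (n : Int) : Int :=
  if n ≤ 0 then 0
  else if n = 1 then 1
  else fibA (n - 1) + fibA (n - 2)
termination_by n.toNat
decreasing_by all_goals omega

def find_total_weight_of_one (purify : Int) (weight : Int) : Int :=
  if purify = 1 then weight
  else
    let ck := fibA (purify - 1)
    let total_ab := 2 * weight + 1 - ck
    if total_ab < 2 then -1
    else if _h : 1 < purify then
      if PySem.Int.mod total_ab 2 = 0 then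
        let a := PySem.Int.floordiv total_ab 2
        find_total_weight_of_one (purify - 1) a + find_total_weight_of_one (purify - 1) a
      else
        let a := PySem.Int.floordiv total_ab 2
        let b := total_ab - a
        find_total_weight_of_one (purify - 1) a + find_total_weight_of_one (purify - 1) b
    else 0  -- here (purify ≤ 0, total_ab ≥ 2) Python A recurses forever and never returns; excluded by Pre_
termination_by purify.toNat
decreasing_by all_goals omega

-- ===== PORT B =====
def fibIter (n : Int) : Int :=
  ((PySem.List.pyRange 0 n 1).foldl (fun (ab : Int × Int) _ => (ab.2, ab.1 + ab.2)) (0, 1)).1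

-- body of B's inner 'for w, c in counts.items()' loop; state = (nxt, total)
def ftwStep (ck : Int) (st : (PySem.Dict Int Int) × Int) (wc : Int × Int) : (PySem.Dict Int Int) × Int :=
  let t := 2 * wc.1 + 1 - ck
  if t < 2 then (st.1, st.2 - wc.2)
  else
    let a := PySem.Int.floordiv t 2
    let b := t - a
    let d1 := st.1.insert a (st.1.getD a 0 + wc.2)
    (d1.insert b (d1.getD b 0 + wc.2), st.2)

-- B's 'while p > 1' loop (fuel = p - 1 iterations) followed by the final summing loop
def ftwLoop : Nat → Int → PySem.Dict Int Int → Int → Int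
  | 0, _, counts, total => counts.items.foldl (fun acc wc => acc + wc.1 * wc.2) total
  | fuel + 1, p, counts, total =>
      let ck := fibIter (p - 1)
      let st := counts.items.foldl (ftwStep ck) ((PySem.Dict.mk []), total)
      ftwLoop fuel (p - 1) st.1 st.2

def find_total_weight_of_one_alt (purify : Int) (weight : Int) : Int :=
  if purify = 1 then weight
  else ftwLoop (purify - 1).toNat purify ((PySem.Dict.mk []).insert weight 1) 0

-- ===== PRECONDITION & SPEC =====
-- Pre_ restricts to the function's natural domain purify ≥ 1: for purify ≤ 0 the Python A either
-- recurses forever (weight ≥ 1: RecursionError) or returns the sentinel -1 out of a degenerate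
-- recursion below the intended domain (weight ≤ 0), an artefact of A's missing guard.
-- The upper bound purify ≤ 900 excludes the inputs where A's naive fib recursion is deeper than
-- CPython's recursion limit and A raises RecursionError (purify around 1000 and above); A cannot
-- return on any excluded purify > 35 anyway (its runtime there exceeds any feasible budget).
def Pre_find_total_weight_of_one (purify : Int) (weight : Int) : Prop := 1 ≤ purify ∧ purify ≤ 900
instance (purify : Int) (weight : Int) : Decidable (Pre_find_total_weight_of_one purify weight) := by
  unfold Pre_find_total_weight_of_one; infer_instance

def pvWitness_find_total_weight_of_one : Int × Int := (4, 7)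

def Spec_find_total_weight_of_one (purify : Int) (weight : Int) (out : Int) : Prop := out = find_total_weight_of_one_alt purify weight
instance (purify : Int) (weight : Int) (out : Int) : Decidable (Spec_find_total_weight_of_one purify weight out) := by unfold Spec_find_total_weight_of_one; infer_instance

-- ===== CLAIM (what is proved, stated in full; the proofs are below) =====
def Claim_equal_find_total_weight_of_one : Prop := ∀ (purify : Int) (weight : Int), Dom_find_total_weight_of_one purify weight → Pre_find_total_weight_of_one purify weight → Spec_find_total_weight_of_one purify weight (find_total_weight_of_one purify weight)

-- ===== LEMMAS AND PROOFS =====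

-- Nat-indexed Fibonacci, the common reference point for fibA and fibIter
def fibN : Nat → Int
  | 0 => 0
  | 1 => 1
  | n + 2 => fibN (n + 1) + fibN n

theorem fibA_eq (n : Int) : fibA n = fibN n.toNat := by
  generalize h : n.toNat = k
  induction k using Nat.strong_induction_on generalizing n with
  | _ k ih =>
    rw [fibA]
    split
    · have : k = 0 := by omega
      simp [this, fibN]
    · split
      · have : k = 1 := by omega
        simp [this, fibN]
      · obtain ⟨m, rfl⟩ : ∃ m, k = m + 2 := ⟨k - 2, by omega⟩
        rw [ih (m + 1) (by omega) (n - 1) (by omega), ih m (by omega) (n - 2) (by omega)]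
        rfl

theorem fib_fold (l : List Int) (k : Nat) :
    l.foldl (fun (ab : Int × Int) _ => (ab.2, ab.1 + ab.2)) (fibN k, fibN (k + 1))
      = (fibN (k + l.length), fibN (k + l.length + 1)) := by
  induction l generalizing k with
  | nil => simp
  | cons x xs ih =>
    have h2 : fibN k + fibN (k + 1) = fibN (k + 2) := by rw [fibN]; ring
    simp only [List.foldl_cons, h2]
    rw [ih (k + 1)]
    have hl : (x :: xs).length = xs.length + 1 := rfl
    rw [hl]
    congr 2 <;> omega

theorem fibIter_eq (n : Int) : fibIter n = fibA n := by
  rw [fibA_eq]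
  unfold fibIter
  have h0 : ((0 : Int), (1 : Int)) = (fibN 0, fibN 1) := rfl
  rw [h0, fib_fold, PySem.List.length_pyRange_one]
  simp

-- Σ count * f weight over an item list
def wsum (l : List (Int × Int)) (f : Int → Int) : Int := (l.map (fun wc => wc.2 * f wc.1)).sum

theorem wsum_overwrite (k v c : Int) (f : Int → Int) :
    ∀ l : List (Int × Int), (l.map Prod.fst).Nodup → (k, v) ∈ l →
    wsum (l.map (fun p => if p.1 == k then (k, v + c) else p)) f = wsum l f + c * f k := by
  intro l
  induction l with
  | nil => simp
  | cons p ps ih =>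
    intro hnd hm
    simp only [List.map_cons, List.nodup_cons] at hnd
    rcases List.mem_cons.mp hm with h | h
    · subst h
      simp only [List.map_cons]
      have hid : ps.map (fun p => if p.1 == k then ((k : Int), v + c) else p) = ps := by
        rw [List.map_congr_left (g := id) (fun q hq => by
          have hqk : q.1 ≠ k := by
            intro he
            apply hnd.1
            rw [← he]
            exact List.mem_map.mpr ⟨q, hq, rfl⟩
          simp [hqk])]
        exact List.map_id ps
      rw [hid]
      simp [wsum]
      ring
    · have hk : k ∈ ps.map Prod.fst := List.mem_map_of_mem (f := Prod.fst) h
      have hp1 : p.1 ≠ k := fun he => hnd.1 (he ▸ hk)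
      have hne : ¬((p.1 == k) = true) := by simp [hp1]
      simp only [wsum, List.map_cons, List.sum_cons, if_neg hne]
      simp only [wsum] at ih
      rw [ih hnd.2 h]
      ring

theorem wsum_insert (d : PySem.Dict Int Int) (k c : Int) (f : Int → Int) (hnd : d.keys.Nodup) :
    wsum ((d.insert k (d.getD k 0 + c)).items) f = wsum d.items f + c * f k := by
  by_cases hc : d.contains k = true
  · have hsome : (d.get? k).isSome := by rw [← PySem.Dict.contains_eq_isSome_get?]; exact hc
    obtain ⟨v, hv⟩ := Option.isSome_iff_exists.mp hsome
    have hgd : d.getD k 0 = v := PySem.Dict.getD_of_get?_eq_some d 0 hv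
    have hmem : (k, v) ∈ d.items := PySem.Dict.mem_items_of_get?_eq_some d hv
    rw [hgd, PySem.Dict.items_insert_of_contains d _ hc]
    have hkeys : (d.items.map Prod.fst).Nodup := by
      simpa [PySem.Dict.keys] using hnd
    exact wsum_overwrite k v c f d.items hkeys hmem
  · have hc' : d.contains k = false := by simpa using hc
    rw [PySem.Dict.items_insert_of_not_contains d _ hc', PySem.Dict.getD_of_not_contains d 0 hc']
    simp only [wsum, List.map_append, List.sum_append, List.map_cons, List.map_nil,
      List.sum_cons, List.sum_nil]
    ring

theorem keys_insert_nodup (d : PySem.Dict Int Int) (k v : Int) (hnd : d.keys.Nodup) :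
    (d.insert k v).keys.Nodup := PySem.Dict.nodup_keys_insert d k v hnd

-- the two inserts a non-pruned item performs, as one function (proof-local)
def ins2 (ck : Int) (d : PySem.Dict Int Int) (wc : Int × Int) : PySem.Dict Int Int :=
  let t := 2 * wc.1 + 1 - ck
  let a := PySem.Int.floordiv t 2
  let b := t - a
  let d1 := d.insert a (d.getD a 0 + wc.2)
  d1.insert b (d1.getD b 0 + wc.2)

-- one level of B's inner loop preserves  total + Σ count * F' (child-weight)  where each parent
-- weight w contributes  count * (A's one-step value at w)
theorem fold_step (ck : Int) (F' : Int → Int) (l : List (Int × Int)) :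
    ∀ (d : PySem.Dict Int Int) (t : Int), d.keys.Nodup →
    (l.foldl (ftwStep ck) (d, t)).1.keys.Nodup ∧
    (l.foldl (ftwStep ck) (d, t)).2 + wsum (l.foldl (ftwStep ck) (d, t)).1.items F'
      = t + wsum d.items F'
        + (l.map (fun wc => wc.2 * (if 2 * wc.1 + 1 - ck < 2 then -1
            else F' (PySem.Int.floordiv (2 * wc.1 + 1 - ck) 2)
               + F' ((2 * wc.1 + 1 - ck) - PySem.Int.floordiv (2 * wc.1 + 1 - ck) 2)))).sum := by
  induction l with
  | nil => intro d t hnd; simpa using hnd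
  | cons wc l ih =>
    intro d t hnd
    simp only [List.foldl_cons, List.map_cons, List.sum_cons]
    by_cases hlt : 2 * wc.1 + 1 - ck < 2
    · have hstep : ftwStep ck (d, t) wc = (d, t - wc.2) := by
        simp [ftwStep, hlt]
      rw [hstep, if_pos hlt]
      obtain ⟨h1, h2⟩ := ih d (t - wc.2) hnd
      exact ⟨h1, by rw [h2]; ring⟩
    · have hstep : ftwStep ck (d, t) wc = (ins2 ck d wc, t) := by
        simp only [ftwStep, ins2, if_neg hlt]
      have hnd2 : (ins2 ck d wc).keys.Nodup := by
        simp only [ins2]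
        exact keys_insert_nodup _ _ _ (keys_insert_nodup _ _ _ hnd)
      obtain ⟨h1, h2⟩ := ih (ins2 ck d wc) t hnd2
      rw [hstep, if_neg hlt]
      refine ⟨h1, ?_⟩
      rw [h2]
      simp only [ins2]
      rw [wsum_insert _ _ wc.2 F' (keys_insert_nodup _ _ _ hnd), wsum_insert d _ wc.2 F' hnd]
      ring

-- A's one-step unfolding for purify ≥ 2, with the even/odd split merged
theorem F_step (p w : Int) (hp : 2 ≤ p) :
    find_total_weight_of_one p w
      = (if 2 * w + 1 - fibA (p - 1) < 2 then -1
         else find_total_weight_of_one (p - 1) (PySem.Int.floordiv (2 * w + 1 - fibA (p - 1)) 2)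
            + find_total_weight_of_one (p - 1)
                ((2 * w + 1 - fibA (p - 1)) - PySem.Int.floordiv (2 * w + 1 - fibA (p - 1)) 2)) := by
  have hne : p ≠ 1 := by omega
  have h1 : 1 < p := by omega
  rw [find_total_weight_of_one]
  simp only [if_neg hne]
  by_cases hlt : 2 * w + 1 - fibA (p - 1) < 2
  · simp [hlt]
  · simp only [if_neg hlt, dif_pos h1]
    set t := 2 * w + 1 - fibA (p - 1) with ht
    by_cases hm : PySem.Int.mod t 2 = 0
    · have hdm := PySem.Int.floordiv_mul_add_mod t 2
      have heq : t - PySem.Int.floordiv t 2 = PySem.Int.floordiv t 2 := by omega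
      rw [if_pos hm, heq]
    · rw [if_neg hm]

theorem F_one (w : Int) : find_total_weight_of_one 1 w = w := by
  rw [find_total_weight_of_one]; simp

-- B's outer loop computes  total + Σ count * A(p, w)  over the current level counter
theorem loop_eq : ∀ (fuel : Nat) (counts : PySem.Dict Int Int) (total : Int),
    counts.keys.Nodup →
    ftwLoop fuel ((fuel : Int) + 1) counts total
      = total + wsum counts.items (fun w => find_total_weight_of_one ((fuel : Int) + 1) w) := by
  intro fuel
  induction fuel with
  | zero =>
    intro counts total _
    show counts.items.foldl (fun acc wc => acc + wc.1 * wc.2) total = _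
    have : ∀ l : List (Int × Int), ∀ t : Int,
        l.foldl (fun acc wc => acc + wc.1 * wc.2) t
          = t + wsum l (fun w => find_total_weight_of_one ((0 : Int) + 1) w) := by
      intro l
      induction l with
      | nil => intro t; simp [wsum]
      | cons wc l ih =>
        intro t
        simp only [List.foldl_cons, wsum, List.map_cons, List.sum_cons] at *
        rw [ih]
        have : find_total_weight_of_one ((0 : Int) + 1) wc.1 = wc.1 := by
          simpa using F_one wc.1
        rw [this]; ring
    simpa using this counts.items total
  | succ fuel ih =>
    intro counts total hnd
    have hcast : ((fuel + 1 : Nat) : Int) = (fuel : Int) + 1 := by push_cast; ring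
    rw [hcast, ftwLoop]
    have hp1 : (((fuel : Int) + 1) + 1) - 1 = ((fuel : Int) + 1) := by ring
    rw [hp1]
    have hck : fibIter ((fuel : Int) + 1) = fibA ((fuel : Int) + 1) := fibIter_eq _
    set ck := fibIter ((fuel : Int) + 1) with hckdef
    obtain ⟨hnd', hsum⟩ := fold_step ck (fun w => find_total_weight_of_one ((fuel : Int) + 1) w)
      counts.items (PySem.Dict.mk []) total (by simp [PySem.Dict.keys])
    rw [ih _ _ hnd', hsum]
    have hempty : wsum (PySem.Dict.mk ([] : List (Int × Int))).items
        (fun w => find_total_weight_of_one ((fuel : Int) + 1) w) = 0 := by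
      simp [wsum]
    rw [hempty]
    have hFs : ∀ wc : Int × Int,
        (wc.2 * (if 2 * wc.1 + 1 - ck < 2 then -1
            else find_total_weight_of_one ((fuel : Int) + 1)
                  (PySem.Int.floordiv (2 * wc.1 + 1 - ck) 2)
               + find_total_weight_of_one ((fuel : Int) + 1)
                  ((2 * wc.1 + 1 - ck) - PySem.Int.floordiv (2 * wc.1 + 1 - ck) 2)))
          = wc.2 * find_total_weight_of_one (((fuel : Int) + 1) + 1) wc.1 := by
      intro wc
      have h2 : (2 : Int) ≤ ((fuel : Int) + 1) + 1 := by omega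
      rw [F_step _ wc.1 h2]
      have hm1 : (((fuel : Int) + 1) + 1) - 1 = ((fuel : Int) + 1) := by ring
      rw [hm1, ← hck]
    rw [wsum]
    rw [List.map_congr_left (fun wc _ => (hFs wc).symm)]
    ring

-- ===== VERDICT (by name: the statement is the Claim_ definition above) =====
theorem find_total_weight_of_one_spec : Claim_equal_find_total_weight_of_one := by
  intro purify weight _ hpre
  unfold Spec_find_total_weight_of_one
  by_cases h1 : purify = 1
  · subst h1
    rw [F_one]
    simp [find_total_weight_of_one_alt]
  · have h2 : 2 ≤ purify := by
      have : 1 ≤ purify := hpre.1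
      omega
    rw [find_total_weight_of_one_alt, if_neg h1]
    have hfuel : (((purify - 1).toNat : Int)) + 1 = purify := by omega
    have hnd : ((PySem.Dict.mk ([] : List (Int × Int))).insert weight 1).keys.Nodup :=
      keys_insert_nodup _ _ _ (by simp [PySem.Dict.keys])
    have := loop_eq (purify - 1).toNat ((PySem.Dict.mk []).insert weight 1) 0 hnd
    rw [hfuel] at this
    rw [this]
    have hitems : ((PySem.Dict.mk ([] : List (Int × Int))).insert weight 1).items
        = [(weight, 1)] := rfl
    rw [hitems]
    simp [wsum]
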